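-- pv_equiv track=rewrite | github.com/Zunzelf/pyOCR | segmentation.py | x_proj
-- ===== SOURCE A (Python) =====
-- def x_proj(image):
-- 	res = []
-- 	for i in range(len(image[0])):
-- 		temp = 0
-- 		for j in range(len(image)):
-- 			if image[j][i] == 1 :
-- 				temp += 1
-- 		res.append(temp)
-- 	return res
-- ===== SOURCE B (Python) =====
-- def x_proj(image):
--     res = [0] * len(image[0])
--     for row in image:
--         res = [c + (1 if v == 1 else 0) for c, v in zip(res, row)]
--     return res
-- ===== Notes on version B (the rewrite author's own statement) =====
-- stated objective: alternative
-- what changed: One row-major sweep maintaining a running count vector (zip of counts with each row) instead of column-at-a-time nested scans that append one completed count per column.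
import Mathlib
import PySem

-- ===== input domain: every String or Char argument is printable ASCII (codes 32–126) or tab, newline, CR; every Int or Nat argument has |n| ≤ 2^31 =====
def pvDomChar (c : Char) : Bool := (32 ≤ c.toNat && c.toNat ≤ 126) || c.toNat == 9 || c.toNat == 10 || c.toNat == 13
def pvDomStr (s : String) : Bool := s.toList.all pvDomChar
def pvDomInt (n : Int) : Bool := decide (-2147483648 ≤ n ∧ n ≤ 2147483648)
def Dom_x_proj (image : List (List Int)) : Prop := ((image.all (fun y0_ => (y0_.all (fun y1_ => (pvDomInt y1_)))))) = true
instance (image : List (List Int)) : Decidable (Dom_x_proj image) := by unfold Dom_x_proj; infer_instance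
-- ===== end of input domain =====

-- B makes one row-major sweep keeping a running count vector (zipped with each row)
-- instead of A's column-at-a-time nested scans; equal cost, different decomposition.

-- ===== PORT A =====
-- A: for i in range(len(image[0])): count over j of image[j][i] == 1; append.
def x_proj (image : List (List Int)) : List Int :=
  (List.range (image.headD []).length).map (fun i =>
    (List.range image.length).foldl (fun temp j =>
      if (image.getD j []).getD i 0 = 1 then temp + 1 else temp) 0)

-- ===== PORT B =====
-- B: res = [0]*len(image[0]); for row: res = [c + (1 if v == 1 else 0) for c,v in zip(res,row)]
def x_proj_alt (image : List (List Int)) : List Int :=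
  image.foldl
    (fun res row => List.zipWith (fun c v => c + if v = 1 then 1 else 0) res row)
    (List.replicate (image.headD []).length (0 : Int))

-- ===== PRECONDITION & SPEC =====
-- Pre_ excludes exactly the inputs on which Python A raises IndexError:
-- the empty image (image[0]) and jagged images with a row shorter than the first row.
def Pre_x_proj (image : List (List Int)) : Prop :=
  image ≠ [] ∧ ∀ r ∈ image, (image.headD []).length ≤ r.length
instance (image : List (List Int)) : Decidable (Pre_x_proj image) := by unfold Pre_x_proj; infer_instance

def pvWitness_x_proj : List (List Int) := [[1, 0, 1], [0, 1, 1]]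

def Spec_x_proj (image : List (List Int)) (out : List Int) : Prop := out = x_proj_alt image
instance (image : List (List Int)) (out : List Int) : Decidable (Spec_x_proj image out) := by unfold Spec_x_proj; infer_instance

-- ===== CLAIM (what is proved, stated in full; the proofs are below) =====
def Claim_equal_x_proj : Prop := ∀ (image : List (List Int)), Dom_x_proj image → Pre_x_proj image → Spec_x_proj image (x_proj image)

-- ===== LEMMAS AND PROOFS =====

-- counting with a shifted accumulator
theorem foldl_count_shift (rows : List (List Int)) (i : Nat) (n : Int) :
    rows.foldl (fun t r => if r.getD i 0 = 1 then t + 1 else t) n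
      = n + rows.foldl (fun t r => if r.getD i 0 = 1 then t + 1 else t) 0 := by
  induction rows generalizing n with
  | nil => simp
  | cons r rs ih =>
    simp only [List.foldl_cons]
    rw [ih, ih (if r.getD i 0 = 1 then 0 + 1 else 0)]
    split_ifs <;> ring

-- A's inner loop over indices equals a fold over the rows themselves
theorem foldl_range_getD (l : List (List Int)) (i : Nat) (n : Int) :
    (List.range l.length).foldl (fun t j => if (l.getD j []).getD i 0 = 1 then t + 1 else t) n
      = l.foldl (fun t r => if r.getD i 0 = 1 then t + 1 else t) n := by
  induction l generalizing n with
  | nil => simp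
  | cons r rs ih =>
    simp only [List.length_cons, List.range_succ_eq_map, List.foldl_cons, List.foldl_map,
      List.getD_cons_zero, List.getD_cons_succ]
    exact ih _

-- invariant of B's sweep: element i of the running vector is its start value plus the count so far
theorem alt_fold_eq (rows : List (List Int)) (acc : List Int)
    (h : ∀ r ∈ rows, acc.length ≤ r.length) :
    rows.foldl (fun res row => List.zipWith (fun c v => c + if v = 1 then 1 else 0) res row) acc
      = (List.range acc.length).map (fun i =>
          acc.getD i 0 + rows.foldl (fun t r => if r.getD i 0 = 1 then t + 1 else t) 0) := by
  induction rows generalizing acc with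
  | nil =>
    simp only [List.foldl_nil]
    apply List.ext_getElem
    · simp
    · intro i h1 h2
      simp only [List.getElem_map, List.getElem_range]
      rw [List.getD_eq_getElem _ _ (by simpa using h1)]
      simp
  | cons r rs ih =>
    simp only [List.foldl_cons]
    have hr : acc.length ≤ r.length := h r (by simp)
    have hlen : (List.zipWith (fun c v => c + if v = 1 then 1 else 0) acc r).length = acc.length := by
      simp [Nat.min_eq_left hr]
    rw [ih _ (by intro x hx; rw [hlen]; exact h x (by simp [hx]))]
    rw [hlen]
    apply List.map_congr_left
    intro i hi
    simp only [List.mem_range] at hi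
    have : (List.zipWith (fun c v => c + if v = 1 then 1 else 0) acc r).getD i 0
        = acc.getD i 0 + if r.getD i 0 = 1 then 1 else 0 := by
      rw [List.getD_eq_getElem _ _ (by omega : i < (List.zipWith _ acc r).length)]
      rw [List.getElem_zipWith]
      rw [List.getD_eq_getElem _ _ hi, List.getD_eq_getElem _ _ (by omega : i < r.length)]
    rw [this]
    rw [foldl_count_shift rs i (if r.getD i 0 = 1 then 0 + 1 else 0)]
    split_ifs <;> ring

-- ===== VERDICT (by name: the statement is the Claim_ definition above) =====
theorem x_proj_spec : Claim_equal_x_proj := by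
  intro image _ hpre
  unfold Spec_x_proj x_proj x_proj_alt
  rw [alt_fold_eq _ _ (by simpa using hpre.2)]
  simp only [List.length_replicate]
  apply List.map_congr_left
  intro i _
  rw [foldl_range_getD]
  simp [List.getD, List.getElem?_replicate]
  split_ifs <;> simp
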